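-- pv_equiv track=rewrite | github.com/r3d91ll/HADES | src/pipelines/bootstrap/preserved_components/lcc_classifier.py | get_lcc_hierarchy
-- ===== SOURCE A (Python) =====
-- from typing import Dict, List, Optional, Set, Tuple, Any
--
-- def get_lcc_hierarchy(lcc_code: str) -> List[str]:
--     """Get the hierarchical path for an LCC code"""
--     parts = lcc_code.split('.')
--     hierarchy = []
--
--     current = ""
--     for i, part in enumerate(parts):
--         if i == 0:
--             current = part
--         else:
--             current += f".{part}"
--         hierarchy.append(current)
--
--     return hierarchy
-- ===== SOURCE B (Python) =====
-- def get_lcc_hierarchy(lcc_code: str):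
--     """Get the hierarchical path for an LCC code"""
--     parts = lcc_code.split('.')
--     return ['.'.join(parts[:i + 1]) for i in range(len(parts))]
-- ===== Notes on version B (the rewrite author's own statement) =====
-- stated objective: idiomatic
-- what changed: Replaces the running 'current' accumulator loop by a single comprehension that rebuilds each prefix directly as '.'.join(parts[:i+1]).
import Mathlib
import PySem

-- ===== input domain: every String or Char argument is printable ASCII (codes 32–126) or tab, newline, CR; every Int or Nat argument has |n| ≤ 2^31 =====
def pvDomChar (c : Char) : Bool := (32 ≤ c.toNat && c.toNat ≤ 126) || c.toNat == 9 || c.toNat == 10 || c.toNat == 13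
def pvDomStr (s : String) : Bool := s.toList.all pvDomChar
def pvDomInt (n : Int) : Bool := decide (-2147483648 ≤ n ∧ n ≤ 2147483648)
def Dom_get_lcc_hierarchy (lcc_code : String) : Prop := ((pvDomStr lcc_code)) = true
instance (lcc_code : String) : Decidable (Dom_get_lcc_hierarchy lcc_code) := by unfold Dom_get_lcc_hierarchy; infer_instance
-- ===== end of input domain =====

-- B replaces A's running `current` accumulator loop by a comprehension that rebuilds each
-- prefix directly as '.'.join(parts[:i+1]) (idiomatic; same observable behaviour, total).

-- ===== PORT A =====
-- A: split on '.', then a loop keeping a running `current` string, appending it each step.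
def get_lcc_hierarchy (lcc_code : String) : List String :=
  let parts := PySem.Chars.splitOn lcc_code.toList ['.']
  let r := (PySem.List.enumerate parts 0).foldl
    (fun (st : List (List Char) × List Char) (ip : Int × List Char) =>
      let current := if ip.1 == 0 then ip.2 else st.2 ++ '.' :: ip.2
      (st.1 ++ [current], current)) ([], [])
  r.1.map String.ofList

-- ===== PORT B =====
-- B: for each i in range(len(parts)), '.'.join(parts[:i+1]).
def get_lcc_hierarchy_alt (lcc_code : String) : List String :=
  let parts := PySem.Chars.splitOn lcc_code.toList ['.']
  (PySem.List.pyRange 0 parts.length 1).map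
    (fun i => String.ofList (PySem.Chars.join ['.'] (PySem.List.slice parts none (some (i + 1)))))

-- ===== PRECONDITION & SPEC =====
def Spec_get_lcc_hierarchy (lcc_code : String) (out : List String) : Prop := out = get_lcc_hierarchy_alt lcc_code
instance (lcc_code : String) (out : List String) : Decidable (Spec_get_lcc_hierarchy lcc_code out) := by unfold Spec_get_lcc_hierarchy; infer_instance

-- ===== CLAIM (what is proved, stated in full; the proofs are below) =====
def Claim_equal_get_lcc_hierarchy : Prop := ∀ (lcc_code : String), Dom_get_lcc_hierarchy lcc_code → Spec_get_lcc_hierarchy lcc_code (get_lcc_hierarchy lcc_code)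

-- ===== LEMMAS AND PROOFS =====

-- '.'.join(xs ++ [x]) appends ".x" when xs is nonempty
theorem pv_join_snoc (sep x : List Char) (p : List Char) (ps : List (List Char)) :
    PySem.Chars.join sep ((p :: ps) ++ [x]) = PySem.Chars.join sep (p :: ps) ++ sep ++ x := by
  induction ps generalizing p with
  | nil =>
      rw [List.cons_append, List.nil_append, PySem.Chars.join_cons_cons,
        PySem.Chars.join_singleton, PySem.Chars.join_singleton]
  | cons q qs ih =>
      have := ih q
      simp only [List.cons_append] at *
      rw [PySem.Chars.join_cons_cons, PySem.Chars.join_cons_cons, this]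
      simp [List.append_assoc]

-- the characterisation of A's loop: state after the whole fold
theorem pv_loop_eq (parts : List (List Char)) :
    (PySem.List.enumerate parts 0).foldl
      (fun (st : List (List Char) × List Char) (ip : Int × List Char) =>
        (st.1 ++ [if ip.1 == 0 then ip.2 else st.2 ++ '.' :: ip.2],
          if ip.1 == 0 then ip.2 else st.2 ++ '.' :: ip.2)) ([], []) =
    ((List.range parts.length).map (fun i => PySem.Chars.join ['.'] (parts.take (i + 1))),
      PySem.Chars.join ['.'] parts) := by
  induction parts using List.reverseRecOn with
  | nil => simp [PySem.List.enumerate]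
  | append_singleton ps x ih =>
      rw [PySem.List.enumerate_append, List.foldl_append, ih]
      simp only [PySem.List.enumerate, List.foldl_cons, List.foldl_nil]
      cases ps with
      | nil => simp [PySem.Chars.join_singleton]
      | cons p ps' =>
          have hjoin := pv_join_snoc ['.'] x p ps'
          have hne : ((0 : Int) + ((p :: ps').length : Nat) == 0) = false := by
            simp only [beq_eq_false_iff_ne, ne_eq, List.length_cons]
            push_cast; omega
          rw [Prod.mk.injEq]
          constructor
          · rw [List.length_append, List.length_singleton, List.range_succ, List.map_append]
            simp only [hne, Bool.false_eq_true, if_false]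
            congr 1
            · apply List.map_congr_left
              intro i hi
              simp only [List.mem_range] at hi
              rw [List.take_append_of_le_length (by omega)]
            · simp only [List.map_singleton]
              rw [List.take_of_length_le (by simp), hjoin]
              simp [List.append_assoc]
          · simp only [hne, Bool.false_eq_true, if_false]
            rw [hjoin]
            simp [List.append_assoc]

-- pyRange 0 n 1 is List.range n cast to Int
theorem pv_pyRange_eq (n : Nat) : PySem.List.pyRange 0 n 1 = (List.range n).map (fun i : Nat => (i : Int)) := by
  induction n with
  | zero => simp [PySem.List.pyRange]
  | succ k ih =>
      rw [show ((k + 1 : Nat) : Int) = (k : Int) + 1 by push_cast; ring,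
        PySem.List.pyRange_one_succ_right (by positivity), ih, List.range_succ]
      simp

theorem pv_pyRange_map (n : Nat) (f : Int → String) :
    (PySem.List.pyRange 0 n 1).map f = (List.range n).map (fun i : Nat => f (i : Int)) := by
  rw [pv_pyRange_eq, List.map_map]; rfl

theorem get_lcc_hierarchy_eq_alt (lcc_code : String) :
    get_lcc_hierarchy lcc_code = get_lcc_hierarchy_alt lcc_code := by
  simp only [get_lcc_hierarchy, get_lcc_hierarchy_alt]
  rw [pv_loop_eq, pv_pyRange_map, List.map_map]
  apply List.map_congr_left
  intro i _
  simp only [Function.comp_apply]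
  rw [PySem.List.slice_to _ (by omega)]
  congr 3

-- ===== VERDICT (by name: the statement is the Claim_ definition above) =====
theorem get_lcc_hierarchy_spec : Claim_equal_get_lcc_hierarchy := by
  intro s _
  unfold Spec_get_lcc_hierarchy
  exact get_lcc_hierarchy_eq_alt s
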